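-- pv_equiv track=rewrite | github.com/Feihm-npu/MoE_Backdoor_Detection | generative_backdoors/detection/perturb_opt_utils.py | collect_perturbed_param_names_opt_lm_peft
-- ===== SOURCE A (Python) =====
-- def collect_perturbed_param_names_opt_lm_peft(
--         start_layer, end_layer, perturb_attention=True, perturb_intermediate=False, freeze_bias=False
-- ):
--     perturbed_param_names = []
--     for i in range(start_layer, end_layer + 1):
--         if perturb_attention:
--             perturbed_param_names.append(f'base_model.model.model.decoder.layers.{i}.self_attn.weight_perturb')
--             if not freeze_bias:
--                 perturbed_param_names.append(f'base_model.model.model.decoder.layers.{i}.self_attn.bias_perturb')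
--         if perturb_intermediate:
--             perturbed_param_names.append(f'base_model.model.model.decoder.layers.{i}.weight_perturb')
--             if not freeze_bias:
--                 perturbed_param_names.append(f'base_model.model.model.decoder.layers.{i}.bias_perturb')
--     return perturbed_param_names
-- ===== SOURCE B (Python) =====
-- def collect_perturbed_param_names_opt_lm_peft(
--         start_layer, end_layer, perturb_attention=True, perturb_intermediate=False, freeze_bias=False
-- ):
--     suffixes = []
--     if perturb_attention:
--         suffixes.append('self_attn.weight_perturb')
--         if not freeze_bias:
--             suffixes.append('self_attn.bias_perturb')
--     if perturb_intermediate: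
--         suffixes.append('weight_perturb')
--         if not freeze_bias:
--             suffixes.append('bias_perturb')
--     # suffix-major columns: one full list of names per suffix across all layers
--     columns = [
--         [f'base_model.model.model.decoder.layers.{i}.{s}' for i in range(start_layer, end_layer + 1)]
--         for s in suffixes
--     ]
--     # transpose to layer-major order and flatten
--     return [name for row in zip(*columns) for name in row]
-- ===== Notes on version B (the rewrite author's own statement) =====
-- stated objective: alternative
-- what changed: Generates the names suffix-major (one complete per-suffix column across all layers) and then transposes with zip(*columns) to recover layer-major order, instead of A's single per-layer loop with nested flag branches.
import Mathlib
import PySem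

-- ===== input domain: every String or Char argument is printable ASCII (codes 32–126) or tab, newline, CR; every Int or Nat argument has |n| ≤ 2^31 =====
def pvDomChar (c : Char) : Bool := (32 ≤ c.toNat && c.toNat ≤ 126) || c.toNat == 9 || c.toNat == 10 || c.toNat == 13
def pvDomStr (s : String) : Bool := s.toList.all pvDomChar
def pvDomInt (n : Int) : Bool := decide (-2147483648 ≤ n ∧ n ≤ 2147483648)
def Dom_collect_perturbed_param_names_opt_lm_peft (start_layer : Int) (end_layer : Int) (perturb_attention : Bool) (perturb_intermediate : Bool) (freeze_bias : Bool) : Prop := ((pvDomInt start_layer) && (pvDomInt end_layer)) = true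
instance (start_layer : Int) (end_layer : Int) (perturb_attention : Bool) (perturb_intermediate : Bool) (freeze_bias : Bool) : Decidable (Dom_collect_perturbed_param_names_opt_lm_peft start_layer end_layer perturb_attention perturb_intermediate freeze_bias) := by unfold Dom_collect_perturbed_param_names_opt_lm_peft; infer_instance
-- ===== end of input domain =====

-- B generates the names suffix-major (one column per suffix across all layers) and transposes
-- with zip(*columns) back to layer-major order; A is a single per-layer loop with nested flag branches.

-- ===== PORT A =====
def collect_perturbed_param_names_opt_lm_peft (start_layer : Int) (end_layer : Int) (perturb_attention : Bool) (perturb_intermediate : Bool) (freeze_bias : Bool) : List String :=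
  (PySem.List.pyRange start_layer (end_layer + 1) 1).foldl (fun acc i =>
    let acc := if perturb_attention then
        let acc := acc ++ ["base_model.model.model.decoder.layers." ++ PySem.Int.toStr i ++ ".self_attn.weight_perturb"]
        if !freeze_bias then
          acc ++ ["base_model.model.model.decoder.layers." ++ PySem.Int.toStr i ++ ".self_attn.bias_perturb"]
        else acc
      else acc
    if perturb_intermediate then
      let acc := acc ++ ["base_model.model.model.decoder.layers." ++ PySem.Int.toStr i ++ ".weight_perturb"]
      if !freeze_bias then
        acc ++ ["base_model.model.model.decoder.layers." ++ PySem.Int.toStr i ++ ".bias_perturb"]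
      else acc
    else acc) []

-- ===== PORT B =====
-- zip(*cols): rows up to the shortest column (zip() with no arguments yields nothing)
def pvZipStar (cols : List (List String)) : List (List String) :=
  let n : Nat := (match cols.map List.length with
    | [] => 0
    | l :: ls => ls.foldl min l)
  (List.range n).map (fun r => cols.map (fun c => getElem! c r))

def collect_perturbed_param_names_opt_lm_peft_alt (start_layer : Int) (end_layer : Int) (perturb_attention : Bool) (perturb_intermediate : Bool) (freeze_bias : Bool) : List String :=
  let suffixes : List String :=
    (if perturb_attention then
        ["self_attn.weight_perturb"] ++ (if !freeze_bias then ["self_attn.bias_perturb"] else [])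
      else [])
    ++ (if perturb_intermediate then
        ["weight_perturb"] ++ (if !freeze_bias then ["bias_perturb"] else [])
      else [])
  let columns : List (List String) :=
    suffixes.map (fun s =>
      (PySem.List.pyRange start_layer (end_layer + 1) 1).map (fun i =>
        "base_model.model.model.decoder.layers." ++ PySem.Int.toStr i ++ "." ++ s))
  (pvZipStar columns).flatten

-- ===== PRECONDITION & SPEC =====
def Spec_collect_perturbed_param_names_opt_lm_peft (start_layer : Int) (end_layer : Int) (perturb_attention : Bool) (perturb_intermediate : Bool) (freeze_bias : Bool) (out : List String) : Prop := out = collect_perturbed_param_names_opt_lm_peft_alt start_layer end_layer perturb_attention perturb_intermediate freeze_bias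
instance (start_layer : Int) (end_layer : Int) (perturb_attention : Bool) (perturb_intermediate : Bool) (freeze_bias : Bool) (out : List String) : Decidable (Spec_collect_perturbed_param_names_opt_lm_peft start_layer end_layer perturb_attention perturb_intermediate freeze_bias out) := by unfold Spec_collect_perturbed_param_names_opt_lm_peft; infer_instance

-- ===== CLAIM (what is proved, stated in full; the proofs are below) =====
def Claim_equal_collect_perturbed_param_names_opt_lm_peft : Prop := ∀ (start_layer : Int) (end_layer : Int) (perturb_attention : Bool) (perturb_intermediate : Bool) (freeze_bias : Bool), Dom_collect_perturbed_param_names_opt_lm_peft start_layer end_layer perturb_attention perturb_intermediate freeze_bias → Spec_collect_perturbed_param_names_opt_lm_peft start_layer end_layer perturb_attention perturb_intermediate freeze_bias (collect_perturbed_param_names_opt_lm_peft start_layer end_layer perturb_attention perturb_intermediate freeze_bias)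

-- ===== LEMMAS AND PROOFS =====

-- A's loop as a flatMap of per-layer blocks
theorem foldlA_eq_flatMap (pa pi fb : Bool) (l : List Int) (acc : List String) :
    l.foldl (fun acc i =>
      let acc := if pa then
          let acc := acc ++ ["base_model.model.model.decoder.layers." ++ PySem.Int.toStr i ++ ".self_attn.weight_perturb"]
          if !fb then acc ++ ["base_model.model.model.decoder.layers." ++ PySem.Int.toStr i ++ ".self_attn.bias_perturb"] else acc
        else acc
      if pi then
        let acc := acc ++ ["base_model.model.model.decoder.layers." ++ PySem.Int.toStr i ++ ".weight_perturb"]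
        if !fb then acc ++ ["base_model.model.model.decoder.layers." ++ PySem.Int.toStr i ++ ".bias_perturb"] else acc
      else acc) acc
    = acc ++ l.flatMap (fun i =>
        (if pa then
            let a := ["base_model.model.model.decoder.layers." ++ PySem.Int.toStr i ++ ".self_attn.weight_perturb"]
            if !fb then a ++ ["base_model.model.model.decoder.layers." ++ PySem.Int.toStr i ++ ".self_attn.bias_perturb"] else a
          else []) ++
        (if pi then
            let a := ["base_model.model.model.decoder.layers." ++ PySem.Int.toStr i ++ ".weight_perturb"]
            if !fb then a ++ ["base_model.model.model.decoder.layers." ++ PySem.Int.toStr i ++ ".bias_perturb"] else a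
          else [])) := by
  induction l generalizing acc with
  | nil => simp
  | cons x xs ih =>
    simp only [List.foldl_cons, List.flatMap_cons, ih]
    cases pa <;> cases pi <;> cases fb <;> simp

-- A's per-layer block equals B's suffix row mapped with the name constructor
theorem perLayer_eq (pa pi fb : Bool) (i : Int) :
    ((if pa then
        let a := ["base_model.model.model.decoder.layers." ++ PySem.Int.toStr i ++ ".self_attn.weight_perturb"]
        if !fb then a ++ ["base_model.model.model.decoder.layers." ++ PySem.Int.toStr i ++ ".self_attn.bias_perturb"] else a
      else []) ++
     (if pi then
        let a := ["base_model.model.model.decoder.layers." ++ PySem.Int.toStr i ++ ".weight_perturb"]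
        if !fb then a ++ ["base_model.model.model.decoder.layers." ++ PySem.Int.toStr i ++ ".bias_perturb"] else a
      else []))
    = ((if pa then ["self_attn.weight_perturb"] ++ (if !fb then ["self_attn.bias_perturb"] else []) else [])
       ++ (if pi then ["weight_perturb"] ++ (if !fb then ["bias_perturb"] else []) else [])).map
        (fun suffix => "base_model.model.model.decoder.layers." ++ PySem.Int.toStr i ++ "." ++ suffix) := by
  cases pa <;> cases pi <;> cases fb <;>
    simp only [show (".self_attn.weight_perturb" : String) = "." ++ "self_attn.weight_perturb" from rfl,
      show (".self_attn.bias_perturb" : String) = "." ++ "self_attn.bias_perturb" from rfl,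
      show (".weight_perturb" : String) = "." ++ "weight_perturb" from rfl,
      show (".bias_perturb" : String) = "." ++ "bias_perturb" from rfl,
      String.append_assoc] <;> simp

theorem foldl_min_const (a : Nat) (l : List Nat) (h : ∀ x ∈ l, x = a) : l.foldl min a = a := by
  induction l with
  | nil => rfl
  | cons x xs ih =>
    have hx := h x (List.mem_cons_self ..)
    simp only [List.foldl_cons, hx, min_self]
    exact ih (fun y hy => h y (List.mem_cons_of_mem _ hy))

theorem getElem!_map_pos {α β : Type} [Inhabited α] [Inhabited β] (h : α → β) (l : List α) (r : Nat) (hr : r < l.length) : (l.map h)[r]! = h l[r]! := by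
  rw [getElem!_pos (l.map h) r (by simpa), getElem!_pos l r hr, List.getElem_map]

theorem rangeMap_flatten (L : List Int) (g : Int → List String) :
    ((List.range L.length).map (fun r => g L[r]!)).flatten = L.flatMap g := by
  induction L with
  | nil => simp
  | cons x xs ih =>
    simp only [List.length_cons, List.range_succ_eq_map, List.map_cons, List.map_map,
      List.flatten_cons, List.flatMap_cons, Function.comp_def,
      List.getElem!_cons_succ, List.getElem!_cons_zero, ih]

-- transpose-flatten of the suffix-major columns is the layer-major flatMap
theorem zipStar_flatten (sfx : List String) (L : List Int) (f : Int → String → String) :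
    (pvZipStar (sfx.map (fun s => L.map (fun i => f i s)))).flatten
    = L.flatMap (fun i => sfx.map (fun s => f i s)) := by
  cases sfx with
  | nil => simp [pvZipStar]
  | cons s0 rest =>
    simp only [pvZipStar, List.map_cons, List.map_map, List.length_map, Function.comp_def]
    have hmin : List.foldl min L.length (List.map (fun _ : String => L.length) rest) = L.length :=
      foldl_min_const _ _ (by intro x hx; obtain ⟨s, _, rfl⟩ := List.mem_map.mp hx; rfl)
    rw [hmin, ← rangeMap_flatten L (fun i => f i s0 :: rest.map (fun s => f i s))]
    congr 1
    refine List.map_congr_left ?_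
    intro r hr
    rw [List.mem_range] at hr
    congr 1
    · exact getElem!_map_pos (fun i => f i s0) L r hr
    · exact List.map_congr_left (fun s _ => getElem!_map_pos (fun i => f i s) L r hr)

-- ===== VERDICT (by name: the statement is the Claim_ definition above) =====
theorem collect_perturbed_param_names_opt_lm_peft_spec : Claim_equal_collect_perturbed_param_names_opt_lm_peft := by
  intro s e pa pi fb _
  unfold Spec_collect_perturbed_param_names_opt_lm_peft
  unfold collect_perturbed_param_names_opt_lm_peft collect_perturbed_param_names_opt_lm_peft_alt
  rw [foldlA_eq_flatMap]
  simp only [List.nil_append]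
  rw [zipStar_flatten]
  congr 1
  funext i
  exact perLayer_eq pa pi fb i
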